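-- pv_equiv track=rewrite | github.com/k5ymaker/ThreatTrace | analytics/baseline.py | _severity_from_deviations
-- ===== SOURCE A (Python) =====
-- from typing import Any, Callable, Dict, List, NamedTuple, Optional, Tuple
--
-- def _severity_from_deviations(devs: List[Dict]) -> str:
--     if not devs:
--         return "INFO"
--     max_sigma = max(d.get("sigma_distance", 0) for d in devs)
--     n = len(devs)
--     if max_sigma >= 100 or n >= 50:
--         return "CRITICAL"
--     if max_sigma >= 20 or n >= 20:
--         return "HIGH"
--     if max_sigma >= 5 or n >= 5:
--         return "MEDIUM"
--     return "LOW"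
-- ===== SOURCE B (Python) =====
-- from typing import Dict, List
--
-- _TIERS = ((100, 50, "CRITICAL"), (20, 20, "HIGH"), (5, 5, "MEDIUM"))
--
-- def _severity_from_deviations(devs: List[Dict]) -> str:
--     if not devs:
--         return "INFO"
--     n = len(devs)
--     for sigma_t, count_t, label in _TIERS:
--         if n >= count_t or any(d.get("sigma_distance", 0) >= sigma_t for d in devs):
--             return label
--     return "LOW"
-- ===== Notes on version B (the rewrite author's own statement) =====
-- stated objective: alternative
-- what changed: B never computes the maximum sigma: it walks a tier table from most to least severe and returns the first tier hit by the count or by an existence scan (any with early exit) over the deviations, instead of A's max-then-OR-cascade.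
import Mathlib
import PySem

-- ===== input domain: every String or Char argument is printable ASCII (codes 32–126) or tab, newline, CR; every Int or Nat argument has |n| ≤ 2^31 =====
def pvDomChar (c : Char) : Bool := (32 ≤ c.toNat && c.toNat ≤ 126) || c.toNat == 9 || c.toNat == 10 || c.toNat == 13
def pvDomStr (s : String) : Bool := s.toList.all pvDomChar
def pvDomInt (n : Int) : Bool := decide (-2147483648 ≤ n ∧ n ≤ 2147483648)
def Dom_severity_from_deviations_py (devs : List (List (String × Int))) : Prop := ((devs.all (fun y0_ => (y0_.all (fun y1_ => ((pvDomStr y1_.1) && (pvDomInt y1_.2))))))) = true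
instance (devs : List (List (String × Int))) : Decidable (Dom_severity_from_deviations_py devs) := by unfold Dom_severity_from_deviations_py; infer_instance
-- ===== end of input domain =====

-- B replaces A's max-then-OR-cascade by a tier-table loop: first tier whose count threshold is met or whose sigma threshold some deviation reaches (alternative decomposition, same cost).


-- ===== PORT A =====
-- d.get("sigma_distance", 0): first-match lookup with default 0 (both Pythons share this line)
def pvGetSigma (d : List (String × Int)) : Int :=
  PySem.Dict.getD (PySem.Dict.mk d) "sigma_distance" 0

def severity_from_deviations_py (devs : List (List (String × Int))) : String :=
  match devs with
  | [] => "INFO"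
  | d :: rest =>
    -- max(... for d in devs): maximum of a nonempty list, Python's max
    let max_sigma := (rest.map pvGetSigma).foldl max (pvGetSigma d)
    let n : Nat := (d :: rest).length
    if max_sigma ≥ 100 ∨ n ≥ 50 then "CRITICAL"
    else if max_sigma ≥ 20 ∨ n ≥ 20 then "HIGH"
    else if max_sigma ≥ 5 ∨ n ≥ 5 then "MEDIUM"
    else "LOW"

-- ===== PORT B =====
-- the _TIERS table of Source B
def pvTiers : List (Int × Nat × String) := [(100, 50, "CRITICAL"), (20, 20, "HIGH"), (5, 5, "MEDIUM")]

-- the for-loop over the tier table; List.any mirrors Python's any(...) existence scan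
def pvTierLoop (devs : List (List (String × Int))) (n : Nat) : List (Int × Nat × String) → String
  | [] => "LOW"
  | (sigma_t, count_t, label) :: rest =>
    if n ≥ count_t ∨ devs.any (fun d => pvGetSigma d ≥ sigma_t) then label
    else pvTierLoop devs n rest

def severity_from_deviations_py_alt (devs : List (List (String × Int))) : String :=
  match devs with
  | [] => "INFO"
  | d :: rest => pvTierLoop (d :: rest) (d :: rest).length pvTiers

-- ===== PRECONDITION & SPEC =====
def Spec_severity_from_deviations_py (devs : List (List (String × Int))) (out : String) : Prop := out = severity_from_deviations_py_alt devs
instance (devs : List (List (String × Int))) (out : String) : Decidable (Spec_severity_from_deviations_py devs out) := by unfold Spec_severity_from_deviations_py; infer_instance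

-- ===== CLAIM (what is proved, stated in full; the proofs are below) =====
def Claim_equal_severity_from_deviations_py : Prop := ∀ (devs : List (List (String × Int))), Dom_severity_from_deviations_py devs → Spec_severity_from_deviations_py devs (severity_from_deviations_py devs)

-- ===== LEMMAS AND PROOFS =====

-- the running maximum reaches t iff the seed or some element does
lemma foldl_max_ge (t a : Int) (l : List Int) :
    t ≤ l.foldl max a ↔ t ≤ a ∨ ∃ x ∈ l, t ≤ x := by
  induction l generalizing a with
  | nil => simp
  | cons y ys ih =>
    simp only [List.foldl_cons, ih, le_max_iff, List.mem_cons]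
    constructor
    · rintro (( h | h) | ⟨x, hx, hxt⟩)
      · exact Or.inl h
      · exact Or.inr ⟨y, Or.inl rfl, h⟩
      · exact Or.inr ⟨x, Or.inr hx, hxt⟩
    · rintro (h | ⟨x, (rfl | hx), hxt⟩)
      · exact Or.inl (Or.inl h)
      · exact Or.inl (Or.inr hxt)
      · exact Or.inr ⟨x, hx, hxt⟩

-- B's existence scan decides exactly 'max_sigma ≥ t' for a nonempty list
lemma any_iff_max (d : List (String × Int)) (rest : List (List (String × Int))) (t : Int) :
    ((d :: rest).any (fun x => pvGetSigma x ≥ t) = true)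
      ↔ t ≤ (rest.map pvGetSigma).foldl max (pvGetSigma d) := by
  rw [foldl_max_ge]
  simp [List.any_cons, List.any_eq_true, decide_eq_true_eq, ge_iff_le]

-- ===== VERDICT (by name: the statement is the Claim_ definition above) =====
theorem severity_from_deviations_py_spec : Claim_equal_severity_from_deviations_py := by
  intro devs _
  unfold Spec_severity_from_deviations_py severity_from_deviations_py severity_from_deviations_py_alt
  cases devs with
  | nil => rfl
  | cons d rest =>
    have h100 := any_iff_max d rest 100
    have h20 := any_iff_max d rest 20
    have h5 := any_iff_max d rest 5
    simp only [pvTiers, pvTierLoop, ge_iff_le]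
    split_ifs <;> tauto
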